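-- pv_equiv track=rewrite | github.com/tomasnyberg/cp_notebook | codeforces/862/A.py | check
-- ===== SOURCE A (Python) =====
-- def check(xs, x):
--     bs = []
--     for a in xs:
--         bs.append(a ^ x)
--     res = 0
--     for b in bs:
--         res ^= b
--     return res == 0
-- ===== SOURCE B (Python) =====
-- def check(xs, x):
--     # Process elements two at a time: x cancels within each pair ((a^x)^(b^x) = a^b),
--     # so x only enters once for an unpaired trailing element.
--     res = 0
--     n = len(xs)
--     i = 0
--     while i + 1 < n:
--         res ^= xs[i] ^ xs[i + 1]
--         i += 2
--     if i < n:
--         res ^= xs[i] ^ x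
--     return res == 0
-- ===== Notes on version B (the rewrite author's own statement) =====
-- stated objective: alternative
-- what changed: B never builds the transformed list: it walks the input two elements at a time with a while loop, XORing raw pairs (x cancels inside each pair) and folding x in only for an unpaired trailing element; same O(n) cost, no intermediate list.
import Mathlib
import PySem

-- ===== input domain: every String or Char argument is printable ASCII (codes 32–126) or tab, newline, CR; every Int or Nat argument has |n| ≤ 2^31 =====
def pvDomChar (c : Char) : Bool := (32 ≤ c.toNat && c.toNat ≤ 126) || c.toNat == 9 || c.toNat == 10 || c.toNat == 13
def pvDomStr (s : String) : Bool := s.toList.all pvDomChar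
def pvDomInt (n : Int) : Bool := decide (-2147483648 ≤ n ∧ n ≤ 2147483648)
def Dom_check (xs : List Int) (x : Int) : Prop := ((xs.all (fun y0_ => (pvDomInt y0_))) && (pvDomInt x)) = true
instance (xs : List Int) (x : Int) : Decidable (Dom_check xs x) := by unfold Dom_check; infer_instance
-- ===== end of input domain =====

-- B walks the list two elements at a time with an accumulator, XORing raw pairs (x
-- cancels within a pair) and folding x in only for an unpaired last element, instead of
-- A's build-a-list-of-(a^x) then reduce; alternative decomposition, no intermediate list.


-- ===== PORT A =====
def check (xs : List Int) (x : Int) : Bool :=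
  let bs := xs.foldl (fun bs a => bs ++ [PySem.Int.bxor a x]) []
  let res := bs.foldl (fun res b => PySem.Int.bxor res b) 0
  decide (res = 0)

-- ===== PORT B =====
-- the while loop of Source B: consume two elements per step; a single leftover gets ^ x
def checkGo (x : Int) (res : Int) : List Int → Int
  | [] => res
  | [a] => PySem.Int.bxor res (PySem.Int.bxor a x)
  | a :: b :: t => checkGo x (PySem.Int.bxor res (PySem.Int.bxor a b)) t

def check_alt (xs : List Int) (x : Int) : Bool :=
  decide (checkGo x 0 xs = 0)

-- ===== PRECONDITION & SPEC =====
def Spec_check (xs : List Int) (x : Int) (out : Bool) : Prop := out = check_alt xs x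
instance (xs : List Int) (x : Int) (out : Bool) : Decidable (Spec_check xs x out) := by unfold Spec_check; infer_instance

-- ===== CLAIM =====
def Claim_equal_check : Prop := ∀ (xs : List Int) (x : Int), Dom_check xs x → Spec_check xs x (check xs x)

-- ===== LEMMAS AND PROOFS =====

theorem bx_on (m n : Nat) : PySem.Int.bxor (m : Int) (Int.negSucc n) = Int.negSucc (m ^^^ n) := by
  simp [PySem.Int.bxor, Int.negSucc_eq]
  split_ifs with h
  · exact absurd h (by omega)
  · omega

theorem bx_no (m n : Nat) : PySem.Int.bxor (Int.negSucc m) (n : Int) = Int.negSucc (m ^^^ n) := by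
  simp [PySem.Int.bxor, Int.negSucc_eq]
  split_ifs with h
  · exact absurd h (by omega)
  · omega

theorem bx_nn (m n : Nat) : PySem.Int.bxor (Int.negSucc m) (Int.negSucc n) = ((m ^^^ n : Nat) : Int) := by
  simp [PySem.Int.bxor, Int.negSucc_eq]
  split_ifs with h1 h2 <;> first | (exact absurd ‹_› (by omega)) | omega

theorem bx_assoc (a b c : Int) :
    PySem.Int.bxor (PySem.Int.bxor a b) c = PySem.Int.bxor a (PySem.Int.bxor b c) := by
  rcases a with m|m <;> rcases b with n|n <;> rcases c with k|k <;>
    simp only [Int.ofNat_eq_natCast, PySem.Int.bxor_natCast, bx_on, bx_no, bx_nn, Nat.xor_assoc]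

-- (a ^ x) ^ (b ^ x) = a ^ b : x cancels inside a pair
theorem bx_pair (a b x : Int) :
    PySem.Int.bxor (PySem.Int.bxor a x) (PySem.Int.bxor b x) = PySem.Int.bxor a b := by
  rw [bx_assoc, PySem.Int.bxor_comm b x, ← bx_assoc x x b, PySem.Int.bxor_self,
    PySem.Int.bxor_comm 0 b, PySem.Int.bxor_zero]

-- A's first loop builds the mapped list
theorem foldl_append_map (xs : List Int) (x : Int) (acc : List Int) :
    xs.foldl (fun bs a => bs ++ [PySem.Int.bxor a x]) acc
      = acc ++ xs.map (fun a => PySem.Int.bxor a x) := by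
  induction xs generalizing acc with
  | nil => simp
  | cons a t ih => simp [List.foldl_cons, ih]

-- B's pairwise loop equals A's reduction of the mapped list
theorem checkGo_eq (x : Int) : ∀ (t : List Int) (r : Int),
    checkGo x r t = (t.map (fun a => PySem.Int.bxor a x)).foldl (fun res b => PySem.Int.bxor res b) r
  | [], r => rfl
  | [a], r => rfl
  | a :: b :: t, r => by
    simp only [checkGo, List.map_cons, List.foldl_cons]
    rw [checkGo_eq x t, bx_assoc r, bx_pair]

-- ===== VERDICT =====
theorem check_spec : Claim_equal_check := by
  intro xs x _
  unfold Spec_check check check_alt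
  dsimp only
  rw [foldl_append_map, List.nil_append, checkGo_eq]
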